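-- pv_equiv track=rewrite | github.com/afshinatashian/PreBootcamp | Tamrin7.py | GCD1
-- ===== SOURCE A (Python) =====
-- import math
--
-- def GCD1(N):
--     gcdresult=[]
--     for i in range(1,int(N/2+1)):
--         for j in range(N,int(N/2-1),-1):
--             g=math.gcd(i,j)
--             gcdresult.append(g)
--     gcdresult.sort()
--     largestnum=gcdresult[-1]
--     return largestnum
-- ===== SOURCE B (Python) =====
-- def GCD1(N):
--     # max gcd(i, j) over 1 <= i <= N//2, N//2 <= j <= N is attained at
--     # i = N//2, j = 2*(N//2), giving N//2 directly.
--     return N // 2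
-- ===== Notes on version B (the rewrite author's own statement) =====
-- stated objective: faster
-- what changed: Replaced the quadratic double loop that collects and sorts all pairwise gcds with the closed form N // 2 (the maximum gcd is attained at i = N//2, j = 2*(N//2)).
import Mathlib
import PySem

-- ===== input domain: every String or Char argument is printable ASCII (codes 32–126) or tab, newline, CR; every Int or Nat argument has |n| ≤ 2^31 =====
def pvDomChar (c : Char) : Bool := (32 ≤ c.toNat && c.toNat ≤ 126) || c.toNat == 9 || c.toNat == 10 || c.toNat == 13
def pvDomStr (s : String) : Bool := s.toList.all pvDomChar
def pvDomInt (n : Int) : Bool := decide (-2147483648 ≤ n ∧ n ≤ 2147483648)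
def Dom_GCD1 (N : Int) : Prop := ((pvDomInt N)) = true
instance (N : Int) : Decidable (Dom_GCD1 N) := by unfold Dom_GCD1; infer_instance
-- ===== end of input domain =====

-- B replaces A's quadratic collect-all-gcds-and-sort loop by the closed form N // 2 (faster).
-- ===== PORT A =====
-- int(N/2+1) and int(N/2-1) truncate toward zero; exact as Int.tdiv (N±2) 2 for |N| ≤ 2^31.
-- the nested append loop is rendered as flatMap/map (same list, in order);
-- .sort() is List.mergeSort (· ≤ ·): stable ascending sort, exactly Python's
def GCD1 (N : Int) : Int :=
  let gcdresult : List Int :=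
    (PySem.List.pyRange 1 (Int.tdiv (N + 2) 2) 1).flatMap
      (fun i => (PySem.List.pyRange N (Int.tdiv (N - 2) 2) (-1)).map
        (fun j => (Int.gcd i j : Int)))
  let sortedres := gcdresult.mergeSort (fun a b => a ≤ b)
  -- gcdresult[-1]: IndexError on the empty list is excluded by Pre_GCD1
  PySem.List.pyGetD sortedres (-1) 0

-- ===== PORT B =====
def GCD1_alt (N : Int) : Int := PySem.Int.floordiv N 2

-- ===== PRECONDITION & SPEC =====
-- For N < 2 the collected list is empty and A raises IndexError on gcdresult[-1].
def Pre_GCD1 (N : Int) : Prop := 2 ≤ N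
instance (N : Int) : Decidable (Pre_GCD1 N) := by unfold Pre_GCD1; infer_instance
def pvWitness_GCD1 : Int := 6

def Spec_GCD1 (N : Int) (out : Int) : Prop := out = GCD1_alt N
instance (N : Int) (out : Int) : Decidable (Spec_GCD1 N out) := by unfold Spec_GCD1; infer_instance

-- ===== CLAIM (what is proved, stated in full; the proofs are below) =====
def Claim_equal_GCD1 : Prop := ∀ (N : Int), Dom_GCD1 N → Pre_GCD1 N → Spec_GCD1 N (GCD1 N)

-- ===== LEMMAS AND PROOFS =====

theorem gcd_mem_le {i j g : Int} (hi : 1 ≤ i) (hg : g = (Int.gcd i j : Int)) : g ≤ i := by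
  subst hg
  have h1 : Int.gcd i j ∣ i.natAbs := Int.gcd_dvd_natAbs_left i j
  have h2 : 0 < i.natAbs := by omega
  have := Nat.le_of_dvd h2 h1
  omega

theorem gcd_double (i : Int) (hi : 0 ≤ i) : (Int.gcd i (2 * i) : Int) = i := by
  have : Int.gcd i (2 * i) = Nat.gcd i.natAbs (2 * i).natAbs := rfl
  have h2 : (2 * i).natAbs = 2 * i.natAbs := by
    rw [Int.natAbs_mul]; norm_num
  have hd : i.natAbs ∣ 2 * i.natAbs := Dvd.intro 2 (by ring)
  rw [this, h2, Nat.gcd_eq_left hd]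
  omega

-- last element of a ≤-pairwise list is an upper bound of its members
theorem le_getLast_of_pairwise {l : List Int} (h : l.Pairwise (· ≤ ·)) (hl : l ≠ [])
    {x : Int} (hx : x ∈ l) : x ≤ l.getLast hl := by
  have hsplit : l.dropLast ++ [l.getLast hl] = l := List.dropLast_append_getLast hl
  rw [← hsplit] at h hx
  rcases List.mem_append.mp hx with hx' | hx'
  · have := (List.pairwise_append.mp h).2.2
    exact this x hx' _ (List.mem_singleton_self _)
  · simp at hx'; omega

theorem GCD1_spec' (N : Int) (hN : 2 ≤ N) : GCD1 N = PySem.Int.floordiv N 2 := by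
  have hm : Int.tdiv (N + 2) 2 = (N + 2) / 2 := Int.tdiv_eq_ediv_of_nonneg (by omega)
  have hlo : Int.tdiv (N - 2) 2 = (N - 2) / 2 := Int.tdiv_eq_ediv_of_nonneg (by omega)
  have hfd : PySem.Int.floordiv N 2 = N / 2 := PySem.Int.floordiv_eq_ediv_of_pos (by omega)
  set q : Int := N / 2 with hq
  have hq2 : 2 * q ≤ N ∧ N < 2 * q + 2 := by omega
  unfold GCD1
  set L : List Int := (PySem.List.pyRange 1 (Int.tdiv (N + 2) 2) 1).flatMap
      (fun i => (PySem.List.pyRange N (Int.tdiv (N - 2) 2) (-1)).map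
        (fun j => (Int.gcd i j : Int))) with hL
  -- q is a member of L (take i = q, j = 2*q)
  have hqmem : q ∈ L := by
    rw [hL]
    refine List.mem_flatMap.mpr ⟨q, ?_, ?_⟩
    · rw [PySem.List.mem_pyRange_one, hm]; omega
    · refine List.mem_map.mpr ⟨2 * q, ?_, ?_⟩
      · rw [PySem.List.mem_pyRange_neg_one, hlo]; omega
      · exact gcd_double q (by omega)
  -- every member of L is ≤ q
  have hub : ∀ x ∈ L, x ≤ q := by
    intro x hx
    rw [hL] at hx
    obtain ⟨i, hi, hx⟩ := List.mem_flatMap.mp hx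
    obtain ⟨j, _, hx⟩ := List.mem_map.mp hx
    rw [PySem.List.mem_pyRange_one, hm] at hi
    have := gcd_mem_le (i := i) (j := j) (g := x) hi.1 hx.symm
    omega
  -- the sorted list's last element is q
  have hperm : (L.mergeSort (fun a b => a ≤ b)).Perm L := List.mergeSort_perm L _
  have hne : L.mergeSort (fun a b => a ≤ b) ≠ [] := by
    intro h
    have := hperm.mem_iff.mpr hqmem
    rw [h] at this; simp at this
  rw [PySem.List.pyGetD_neg_one _ _ hne, hfd]
  have hpw : (L.mergeSort (fun a b => a ≤ b)).Pairwise (· ≤ ·) := by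
    have := List.pairwise_mergeSort (le := fun a b : Int => a ≤ b)
      (fun a b c hab hbc => by simp_all; omega)
      (fun a b => by simp [Int.le_total]) L
    simpa using this
  have hlast_mem : (L.mergeSort (fun a b => a ≤ b)).getLast hne ∈ L :=
    hperm.mem_iff.mp (List.getLast_mem hne)
  have h1 : (L.mergeSort (fun a b => a ≤ b)).getLast hne ≤ q := hub _ hlast_mem
  have h2 : q ≤ (L.mergeSort (fun a b => a ≤ b)).getLast hne :=
    le_getLast_of_pairwise hpw hne (hperm.mem_iff.mpr hqmem)
  omega

-- ===== VERDICT (by name: the statement is the Claim_ definition above) =====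
theorem GCD1_spec : Claim_equal_GCD1 := by
  intro N _ hPre
  unfold Spec_GCD1 GCD1_alt
  exact GCD1_spec' N hPre
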